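-- pv_equiv track=rewrite | github.com/cybervaldez/promptyui | webui/prompty/server/api/preview.py | composition_to_indices
-- ===== SOURCE A (Python) =====
-- def composition_to_indices(composition: int, ext_text_count: int, wildcard_counts: dict) -> tuple:
--     """Convert composition ID to (ext_text_idx, {wc_name: idx}) using odometer logic.
--
--     Odometer logic: ext_text outermost (slowest), wildcards alphabetical (fastest).
--
--     Order: ext_text OUTERMOST (slowest), wildcards ALPHABETICAL (last = fastest)
--
--     Example: ext_text=3, wildcards={'mood': 2, 'pose': 4}, Total=24
--       comp 0 → ext=0, mood=0, pose=0
--       comp 1 → ext=0, mood=0, pose=1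
--       comp 4 → ext=0, mood=1, pose=0
--       comp 8 → ext=1, mood=0, pose=0
--       comp 24 → wraps to comp 0
--
--     Args:
--         composition: The composition ID
--         ext_text_count: Number of ext_text values (or 1 if none)
--         wildcard_counts: Dict of {wildcard_name: count}
--
--     Returns:
--         Tuple of (ext_text_idx, {wildcard_name: idx})
--     """
--     ext_text_count = max(1, ext_text_count or 1)
--     sorted_wc = sorted(wildcard_counts.keys())
--     dimensions = [ext_text_count] + [max(1, wildcard_counts.get(n, 1)) for n in sorted_wc]
--
--     total = 1
--     for d in dimensions:
--         total *= d
--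
--     idx = composition % total if total > 0 else 0
--
--     indices = []
--     for dim in reversed(dimensions):
--         indices.append(idx % dim)
--         idx //= dim
--     indices.reverse()
--
--     return indices[0], {n: indices[i + 1] for i, n in enumerate(sorted_wc)}
-- ===== SOURCE B (Python) =====
-- def composition_to_indices(composition: int, ext_text_count: int, wildcard_counts: dict) -> tuple:
--     """Place-value decode: one forward pass, each digit computed independently
--     as (idx // weight) % dim with weights derived by dividing total down; no
--     reversed peeling loop, no intermediate indices list, no final reverse."""
--     ext = max(1, ext_text_count or 1)
--     names = sorted(wildcard_counts)
--     dims = [max(1, wildcard_counts.get(n, 1)) for n in names]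
--     total = ext
--     for d in dims:
--         total *= d
--     idx = composition % total
--     w = total // ext
--     ext_idx = idx // w
--     result = {}
--     for n, d in zip(names, dims):
--         w //= d
--         result[n] = (idx // w) % d
--     return ext_idx, result
-- ===== Notes on version B (the rewrite author's own statement) =====
-- stated objective: alternative
-- what changed: B decodes the mixed-radix composition in a single forward place-value pass, computing each digit independently as (idx // weight) % dim with weights obtained by dividing the total down, instead of A's reversed least-significant-first peeling loop with a mutating quotient, an intermediate indices list and a final reverse.
import Mathlib
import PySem

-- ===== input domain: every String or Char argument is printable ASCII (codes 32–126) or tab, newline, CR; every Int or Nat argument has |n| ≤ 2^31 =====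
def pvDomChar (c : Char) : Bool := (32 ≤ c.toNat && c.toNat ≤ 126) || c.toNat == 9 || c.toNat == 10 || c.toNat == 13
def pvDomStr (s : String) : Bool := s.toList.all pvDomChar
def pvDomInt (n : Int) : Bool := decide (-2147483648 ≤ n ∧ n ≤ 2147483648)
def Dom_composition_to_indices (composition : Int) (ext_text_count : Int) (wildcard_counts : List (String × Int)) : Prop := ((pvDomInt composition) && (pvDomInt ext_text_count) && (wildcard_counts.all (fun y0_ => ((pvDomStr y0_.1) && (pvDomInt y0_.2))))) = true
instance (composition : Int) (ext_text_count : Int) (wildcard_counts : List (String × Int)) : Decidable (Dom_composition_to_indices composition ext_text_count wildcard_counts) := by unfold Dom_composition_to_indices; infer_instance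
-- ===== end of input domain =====

-- B replaces A's reversed digit-peeling loop (mutating quotient + final reverse) by a single
-- forward place-value pass computing each digit independently; alternative decomposition, same cost.


-- ===== PORT A =====
def composition_to_indices (composition : Int) (ext_text_count : Int) (wildcard_counts : List (String × Int)) : Int × (List (String × Int)) :=
  -- ext_text_count = max(1, ext_text_count or 1)
  let ext : Int := max 1 (if ext_text_count = 0 then 1 else ext_text_count)
  let d : PySem.Dict String Int := PySem.Dict.mk wildcard_counts
  let sorted_wc : List String := PySem.List.sorted d.keys (fun x => x) false
  let dimensions : List Int := ext :: sorted_wc.map (fun n => max 1 (d.getD n 1))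
  let total : Int := dimensions.foldl (fun t dd => t * dd) 1
  let idx : Int := if total > 0 then PySem.Int.mod composition total else 0
  -- for dim in reversed(dimensions): indices.append(idx % dim); idx //= dim
  let st : List Int × Int := dimensions.reverse.foldl
    (fun (st : List Int × Int) dim => (st.1 ++ [PySem.Int.mod st.2 dim], PySem.Int.floordiv st.2 dim)) ([], idx)
  let indices : List Int := st.1.reverse
  ((PySem.List.pyGet? indices 0).getD 0,   -- indices[0]; indices is nonempty (dimensions is)
   (PySem.List.enumerate sorted_wc 0).map
     (fun p => (p.2, (PySem.List.pyGet? indices (p.1 + 1)).getD 0)))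

-- ===== PORT B =====
def composition_to_indices_alt (composition : Int) (ext_text_count : Int) (wildcard_counts : List (String × Int)) : Int × (List (String × Int)) :=
  let ext : Int := max 1 (if ext_text_count = 0 then 1 else ext_text_count)
  let d : PySem.Dict String Int := PySem.Dict.mk wildcard_counts
  let names : List String := PySem.List.sorted d.keys (fun x => x) false
  let dims : List Int := names.map (fun n => max 1 (d.getD n 1))
  let total : Int := dims.foldl (fun t dd => t * dd) ext
  let idx : Int := PySem.Int.mod composition total
  let w0 : Int := PySem.Int.floordiv total ext
  let ext_idx : Int := PySem.Int.floordiv idx w0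
  -- for n, d in zip(names, dims): w //= d; result[n] = (idx // w) % d
  let st : Int × List (String × Int) := (names.zip dims).foldl
    (fun (st : Int × List (String × Int)) nd =>
      let w' := PySem.Int.floordiv st.1 nd.2
      (w', st.2 ++ [(nd.1, PySem.Int.mod (PySem.Int.floordiv idx w') nd.2)])) (w0, [])
  (ext_idx, st.2)

-- ===== PRECONDITION & SPEC =====
def Spec_composition_to_indices (composition : Int) (ext_text_count : Int) (wildcard_counts : List (String × Int)) (out : Int × (List (String × Int))) : Prop := out = composition_to_indices_alt composition ext_text_count wildcard_counts
instance (composition : Int) (ext_text_count : Int) (wildcard_counts : List (String × Int)) (out : Int × (List (String × Int))) : Decidable (Spec_composition_to_indices composition ext_text_count wildcard_counts out) := by unfold Spec_composition_to_indices; infer_instance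

-- ===== CLAIM (what is proved, stated in full; the proofs are below) =====
def Claim_equal_composition_to_indices : Prop := ∀ (composition : Int) (ext_text_count : Int) (wildcard_counts : List (String × Int)), Dom_composition_to_indices composition ext_text_count wildcard_counts → Spec_composition_to_indices composition ext_text_count wildcard_counts (composition_to_indices composition ext_text_count wildcard_counts)

-- ===== LEMMAS AND PROOFS =====

-- product of a list of Ints, foldl form used by both ports
def pvProd (l : List Int) : Int := l.foldl (fun t d => t * d) 1

theorem pvProd_foldl (l : List Int) (a : Int) : l.foldl (fun t d => t * d) a = a * pvProd l := by
  induction l generalizing a with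
  | nil => simp [pvProd]
  | cons d t ih =>
    simp only [pvProd, List.foldl_cons]
    rw [ih (a * d), ih (1 * d)]
    ring

theorem pvProd_cons (d : Int) (t : List Int) : pvProd (d :: t) = d * pvProd t := by
  have h := pvProd_foldl t (1 * d)
  simp only [pvProd, List.foldl_cons]
  rw [h]
  unfold pvProd
  ring

theorem pvProd_pos (l : List Int) (h : ∀ d ∈ l, 1 ≤ d) : 1 ≤ pvProd l := by
  induction l with
  | nil => simp [pvProd]
  | cons d t ih =>
    rw [pvProd_cons]
    have hd : 1 ≤ d := h d (by simp)
    have ht : 1 ≤ pvProd t := ih (fun x hx => h x (by simp [hx]))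
    nlinarith

theorem pvProd_append (xs ys : List Int) : pvProd (xs ++ ys) = pvProd xs * pvProd ys := by
  induction xs with
  | nil => simp [pvProd]
  | cons d t ih => rw [List.cons_append, pvProd_cons, pvProd_cons, ih]; ring

theorem pvProd_reverse (l : List Int) : pvProd l.reverse = pvProd l := by
  induction l with
  | nil => rfl
  | cons d t ih =>
    rw [List.reverse_cons, pvProd_append, ih, pvProd_cons, pvProd_cons]
    have h0 : pvProd ([] : List Int) = 1 := rfl
    rw [h0]; ring

-- recursive characterisations of A's peeling fold
def pvPeel : List Int → Int → List Int
  | [], _ => []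
  | d :: t, i => PySem.Int.mod i d :: pvPeel t (PySem.Int.floordiv i d)

def pvDivAll : List Int → Int → Int
  | [], i => i
  | d :: t, i => pvDivAll t (PySem.Int.floordiv i d)

theorem pvPeel_fold (l : List Int) (acc : List Int) (i : Int) :
    l.foldl (fun (st : List Int × Int) dim => (st.1 ++ [PySem.Int.mod st.2 dim], PySem.Int.floordiv st.2 dim)) (acc, i)
      = (acc ++ pvPeel l i, pvDivAll l i) := by
  induction l generalizing acc i with
  | nil => simp [pvPeel, pvDivAll]
  | cons d t ih => simp [pvPeel, pvDivAll, ih]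

theorem pvPeel_append (xs ys : List Int) (i : Int) :
    pvPeel (xs ++ ys) i = pvPeel xs i ++ pvPeel ys (pvDivAll xs i) := by
  induction xs generalizing i with
  | nil => simp [pvPeel, pvDivAll]
  | cons d t ih => simp [pvPeel, pvDivAll, ih]

theorem pvDivAll_eq (l : List Int) (i : Int) (hi : 0 ≤ i) (hl : ∀ d ∈ l, 1 ≤ d) :
    pvDivAll l i = i / pvProd l := by
  induction l generalizing i with
  | nil => simp [pvDivAll, pvProd]
  | cons d t ih =>
    have hd : 1 ≤ d := hl d (by simp)
    have hdpos : (0:Int) < d := by omega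
    have ht : ∀ x ∈ t, 1 ≤ x := fun x hx => hl x (by simp [hx])
    have htp : 1 ≤ pvProd t := pvProd_pos t ht
    simp only [pvDivAll, pvProd_cons]
    rw [PySem.Int.floordiv_eq_ediv_of_pos hdpos,
        ih (i / d) (Int.ediv_nonneg hi (le_of_lt hdpos)) ht,
        Int.ediv_ediv_of_nonneg (le_of_lt hdpos)]

-- canonical forward place-value decode
def pvFwd : List Int → Int → List Int
  | [], _ => []
  | d :: t, i => PySem.Int.mod (i / pvProd t) d :: pvFwd t i

-- A's digits (reverse of the peeled list) are exactly the forward place-value digits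
theorem pvPeel_reverse_eq_fwd (l : List Int) (i : Int) (hi : 0 ≤ i) (hl : ∀ d ∈ l, 1 ≤ d) :
    (pvPeel l.reverse i).reverse = pvFwd l i := by
  induction l generalizing i with
  | nil => rfl
  | cons d t ih =>
    have ht : ∀ x ∈ t, 1 ≤ x := fun x hx => hl x (by simp [hx])
    have htr : ∀ x ∈ t.reverse, 1 ≤ x := by simpa using ht
    rw [List.reverse_cons, pvPeel_append, pvDivAll_eq t.reverse i hi htr, pvProd_reverse]
    simp only [pvPeel, List.reverse_append, List.reverse_cons, List.reverse_nil,
      List.nil_append, List.cons_append, pvFwd]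
    rw [ih i hi ht]

-- B's fold, characterised
def pvBmap : List (String × Int) → Int → Int → List (String × Int)
  | [], _, _ => []
  | nd :: t, w, i =>
    (nd.1, PySem.Int.mod (PySem.Int.floordiv i (PySem.Int.floordiv w nd.2)) nd.2) :: pvBmap t (PySem.Int.floordiv w nd.2) i

theorem pvBmap_fold (l : List (String × Int)) (acc : List (String × Int)) (w i : Int) :
    (l.foldl (fun (st : Int × List (String × Int)) nd =>
        let w' := PySem.Int.floordiv st.1 nd.2
        (w', st.2 ++ [(nd.1, PySem.Int.mod (PySem.Int.floordiv i w') nd.2)])) (w, acc)).2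
      = acc ++ pvBmap l w i := by
  induction l generalizing acc w with
  | nil => simp [pvBmap]
  | cons nd t ih =>
    simp only [List.foldl_cons, pvBmap]
    rw [ih]
    simp

theorem pvBmap_eq_zip_fwd (ns : List String) (ds : List Int) (i : Int)
    (hlen : ns.length = ds.length) (hd : ∀ d ∈ ds, 1 ≤ d) :
    pvBmap (ns.zip ds) (pvProd ds) i = ns.zip (pvFwd ds i) := by
  induction ns generalizing ds with
  | nil => cases ds <;> simp_all [pvBmap]
  | cons n nt ih =>
    cases ds with
    | nil => simp at hlen
    | cons d dt =>
      have hd1 : 1 ≤ d := hd d (by simp)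
      have hdt : ∀ x ∈ dt, 1 ≤ x := fun x hx => hd x (by simp [hx])
      have hw : PySem.Int.floordiv (pvProd (d :: dt)) d = pvProd dt := by
        rw [pvProd_cons, PySem.Int.floordiv_eq_ediv_of_pos (by omega)]
        exact Int.mul_ediv_cancel_left _ (by omega)
      have hpt : (0:Int) < pvProd dt := lt_of_lt_of_le one_pos (pvProd_pos dt hdt)
      simp only [List.zip_cons_cons, pvBmap, pvFwd, hw,
        PySem.Int.floordiv_eq_ediv_of_pos hpt]
      rw [ih dt (by simpa using hlen) hdt]

-- A's dict comprehension over enumerate equals zip with the digit tail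
theorem pvEnum_map_eq_zip (e : Int) (l : List Int) (ns : List String) (k : Nat)
    (hk : k + ns.length ≤ l.length) :
    (PySem.List.enumerate ns (k : Int)).map
        (fun p => (p.2, (PySem.List.pyGet? (e :: l) (p.1 + 1)).getD 0))
      = ns.zip (l.drop k) := by
  induction ns generalizing k with
  | nil => simp [PySem.List.enumerate_nil]
  | cons n nt ih =>
    rw [PySem.List.enumerate_cons]
    have hkl : k < l.length := by simp at hk; omega
    have hget : PySem.List.pyGet? (e :: l) ((k : Int) + 1) = some l[k] := by
      rw [PySem.List.pyGet?_cons_succ]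
      simp [hkl]
    have hdrop : l.drop k = l[k] :: l.drop (k + 1) := (List.getElem_cons_drop hkl).symm
    simp only [List.map_cons, hget, Option.getD_some, hdrop, List.zip_cons_cons]
    have : ((k : Int) + 1) = ((k + 1 : Nat) : Int) := by push_cast; ring
    rw [this, ih (k + 1) (by simp at hk ⊢; omega)]

theorem pvFwd_length (l : List Int) (i : Int) : (pvFwd l i).length = l.length := by
  induction l generalizing i with
  | nil => rfl
  | cons d t ih => simp [pvFwd, ih]

-- the two ports agree once the shared quantities (ext, names, dims) are abstracted
theorem pvCore (c ext : Int) (names : List String) (dims : List Int)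
    (hext : 1 ≤ ext) (hdims : ∀ d ∈ dims, 1 ≤ d) (hlen : names.length = dims.length) :
    (let dimensions : List Int := ext :: dims
     let total : Int := dimensions.foldl (fun t dd => t * dd) 1
     let idx : Int := if total > 0 then PySem.Int.mod c total else 0
     let st : List Int × Int := dimensions.reverse.foldl
       (fun (st : List Int × Int) dim => (st.1 ++ [PySem.Int.mod st.2 dim], PySem.Int.floordiv st.2 dim)) ([], idx)
     let indices : List Int := st.1.reverse
     (((PySem.List.pyGet? indices 0).getD 0 : Int),
      (PySem.List.enumerate names 0).map
        (fun p => (p.2, (PySem.List.pyGet? indices (p.1 + 1)).getD 0))))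
    = (let total : Int := dims.foldl (fun t dd => t * dd) ext
       let idx : Int := PySem.Int.mod c total
       let w0 : Int := PySem.Int.floordiv total ext
       ((PySem.Int.floordiv idx w0 : Int),
        ((names.zip dims).foldl
          (fun (st : Int × List (String × Int)) nd =>
            let w' := PySem.Int.floordiv st.1 nd.2
            (w', st.2 ++ [(nd.1, PySem.Int.mod (PySem.Int.floordiv idx w') nd.2)])) (w0, [])).2)) := by
  dsimp only
  have hextpos : (0:Int) < ext := by omega
  have hP : (0:Int) < pvProd dims := lt_of_lt_of_le one_pos (pvProd_pos dims hdims)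
  have hdall : ∀ d ∈ ext :: dims, 1 ≤ d := by
    intro d hd
    rcases List.mem_cons.mp hd with h | h
    · omega
    · exact hdims d h
  have htotA : (ext :: dims).foldl (fun t dd => t * dd) 1 = ext * pvProd dims := by
    have : (ext :: dims).foldl (fun t dd => t * dd) 1 = pvProd (ext :: dims) := rfl
    rw [this, pvProd_cons]
  have htotB : dims.foldl (fun t dd => t * dd) ext = ext * pvProd dims := pvProd_foldl dims ext
  have htpos : (0:Int) < ext * pvProd dims := mul_pos hextpos hP
  rw [htotA, htotB, if_pos htpos]
  have hw0 : PySem.Int.floordiv (ext * pvProd dims) ext = pvProd dims := by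
    rw [PySem.Int.floordiv_eq_ediv_of_pos hextpos]
    exact Int.mul_ediv_cancel_left _ (ne_of_gt hextpos)
  rw [hw0]
  have hidx0 : 0 ≤ PySem.Int.mod c (ext * pvProd dims) := by
    rw [PySem.Int.mod_eq_emod_of_pos htpos]
    exact Int.emod_nonneg c (ne_of_gt htpos)
  have hidxlt : PySem.Int.mod c (ext * pvProd dims) < ext * pvProd dims := by
    rw [PySem.Int.mod_eq_emod_of_pos htpos]
    exact Int.emod_lt_of_pos c htpos
  generalize hidx : PySem.Int.mod c (ext * pvProd dims) = idx at hidx0 hidxlt ⊢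
  rw [pvPeel_fold, List.nil_append, pvPeel_reverse_eq_fwd (ext :: dims) idx hidx0 hdall]
  have hfwd : pvFwd (ext :: dims) idx
      = PySem.Int.mod (idx / pvProd dims) ext :: pvFwd dims idx := rfl
  rw [hfwd]
  have hq0 : 0 ≤ idx / pvProd dims := Int.ediv_nonneg hidx0 (le_of_lt hP)
  have hqlt : idx / pvProd dims < ext :=
    (Int.ediv_lt_iff_lt_mul hP).mpr (by linarith [hidxlt])
  have hfst : PySem.Int.mod (idx / pvProd dims) ext = PySem.Int.floordiv idx (pvProd dims) := by
    rw [PySem.Int.mod_eq_emod_of_pos hextpos, PySem.Int.floordiv_eq_ediv_of_pos hP]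
    exact Int.emod_eq_of_lt hq0 hqlt
  have hsnd : (PySem.List.enumerate names 0).map
      (fun p => (p.2, (PySem.List.pyGet? (PySem.Int.mod (idx / pvProd dims) ext :: pvFwd dims idx) (p.1 + 1)).getD 0))
      = names.zip (pvFwd dims idx) := by
    have hk : 0 + names.length ≤ (pvFwd dims idx).length := by
      rw [pvFwd_length]; omega
    have h := pvEnum_map_eq_zip (PySem.Int.mod (idx / pvProd dims) ext) (pvFwd dims idx) names 0 hk
    simpa using h
  rw [pvBmap_fold, List.nil_append, pvBmap_eq_zip_fwd names dims idx hlen hdims]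
  simp only [PySem.List.pyGet?_zero_cons, Option.getD_some]
  rw [hsnd, hfst]

-- ===== VERDICT (by name: the statement is the Claim_ definition above) =====
theorem composition_to_indices_spec : Claim_equal_composition_to_indices := by
  intro composition ext_text_count wildcard_counts _
  unfold Spec_composition_to_indices
  show composition_to_indices composition ext_text_count wildcard_counts
      = composition_to_indices_alt composition ext_text_count wildcard_counts
  unfold composition_to_indices composition_to_indices_alt
  exact pvCore composition
    (max 1 (if ext_text_count = 0 then 1 else ext_text_count))
    (PySem.List.sorted (PySem.Dict.mk wildcard_counts).keys (fun x => x) false)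
    ((PySem.List.sorted (PySem.Dict.mk wildcard_counts).keys (fun x => x) false).map
      (fun n => max 1 ((PySem.Dict.mk wildcard_counts).getD n 1)))
    (le_max_left _ _)
    (by intro d hd; rcases List.mem_map.mp hd with ⟨n, _, rfl⟩; exact le_max_left _ _)
    (by rw [List.length_map])
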